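-- pv_equiv track=rewrite | github.com/Luzifer/advent-of-code-2018 | day02.py | get_multi_letter_counts
-- ===== SOURCE A (Python) =====
-- def get_multi_letter_counts(box_ids):
--     n2, n3 = {}, {}
--
--     for box_id in box_ids:
--         char_counts = {s: list(box_id).count(s) for s in list(box_id)}
--
--         for c, n in char_counts.items():
--             if n == 2:
--                 n2[box_id] = True
--             elif n == 3:
--                 n3[box_id] = True
--
--     return (len(n2), len(n3))
-- ===== SOURCE B (Python) =====
-- def get_multi_letter_counts(box_ids):
--     n2 = n3 = 0
--     seen = set()
--     for bid in box_ids: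
--         if bid in seen:
--             continue
--         seen.add(bid)
--         s = sorted(bid)
--         has2 = has3 = False
--         i = 0
--         while i < len(s):
--             j = i + 1
--             while j < len(s) and s[j] == s[i]:
--                 j += 1
--             if j - i == 2:
--                 has2 = True
--             elif j - i == 3:
--                 has3 = True
--             i = j
--         n2 += has2
--         n3 += has3
--     return (n2, n3)
-- ===== Notes on version B (the rewrite author's own statement) =====
-- stated objective: alternative
-- what changed: A counts every character of every id with repeated list.count into per-id dicts and tallies flagged ids in two dicts; B never counts occurrences: it sorts each id's characters and detects a run of length exactly 2 or 3 by an adjacency scan, tallying with integer accumulators over a seen-set of distinct ids.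
import Mathlib
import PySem

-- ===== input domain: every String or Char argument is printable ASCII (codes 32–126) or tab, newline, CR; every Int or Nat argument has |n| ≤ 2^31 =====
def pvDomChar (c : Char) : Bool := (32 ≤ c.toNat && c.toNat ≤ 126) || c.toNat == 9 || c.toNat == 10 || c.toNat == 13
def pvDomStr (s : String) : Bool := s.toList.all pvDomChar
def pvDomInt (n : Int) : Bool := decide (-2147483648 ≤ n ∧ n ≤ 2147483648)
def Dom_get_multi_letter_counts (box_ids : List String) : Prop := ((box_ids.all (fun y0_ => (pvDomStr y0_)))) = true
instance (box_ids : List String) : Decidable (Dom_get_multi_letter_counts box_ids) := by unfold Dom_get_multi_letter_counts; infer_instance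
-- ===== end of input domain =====

-- ===== PORT A =====
-- One line: B replaces A's per-character counting into two flag dicts by a sort-and-scan
-- run-length detection per distinct id with integer tallies; alternative algorithm, same results.

-- char_counts = {s: list(box_id).count(s) for s in list(box_id)}
def pvCharCounts (cs : List Char) : PySem.Dict Char Int :=
  cs.foldl (fun d s => d.insert s ((PySem.List.count cs s : Nat) : Int)) PySem.Dict.empty

-- the inner 'for c, n in char_counts.items(): …' loop, updating the pair (n2, n3)
def pvInner (bid : String) (acc : PySem.Dict String Bool × PySem.Dict String Bool) :
    PySem.Dict String Bool × PySem.Dict String Bool :=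
  (pvCharCounts bid.toList).items.foldl
    (fun acc cn =>
      if cn.2 == 2 then (acc.1.insert bid true, acc.2)
      else if cn.2 == 3 then (acc.1, acc.2.insert bid true)
      else acc) acc

def get_multi_letter_counts (box_ids : List String) : Int × Int :=
  let r := box_ids.foldl (fun acc bid => pvInner bid acc) (PySem.Dict.empty, PySem.Dict.empty)
  ((r.1.size : Int), (r.2.size : Int))

-- ===== PORT B =====
-- the two nested while loops over s = sorted(bid): consume one maximal run of equal
-- characters per outer step (inner while = takeWhile/dropWhile) and set the flags
def pvRunScan : List Char → Bool × Bool
  | [] => (false, false)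
  | c :: rest =>
    let run : Nat := 1 + (rest.takeWhile (fun d => d == c)).length
    let p := pvRunScan (rest.dropWhile (fun d => d == c))
    ((run == 2) || p.1, (run == 3) || p.2)
termination_by s => s.length
decreasing_by
  exact Nat.lt_succ_of_le (List.length_dropWhile_le _ _)

-- one iteration of the 'for bid in box_ids' loop; state = (n2, n3, seen)
def pvStep (acc : Int × Int × PySem.Set String) (bid : String) : Int × Int × PySem.Set String :=
  if PySem.Set.contains acc.2.2 bid then acc
  else
    let p := pvRunScan (PySem.List.sorted bid.toList (fun c => c) false)
    (acc.1 + (if p.1 then 1 else 0), acc.2.1 + (if p.2 then 1 else 0),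
     PySem.Set.add acc.2.2 bid)

def get_multi_letter_counts_alt (box_ids : List String) : Int × Int :=
  let r := box_ids.foldl pvStep (0, 0, PySem.Set.empty)
  (r.1, r.2.1)

-- ===== PRECONDITION & SPEC =====
def Spec_get_multi_letter_counts (box_ids : List String) (out : Int × Int) : Prop := out = get_multi_letter_counts_alt box_ids
instance (box_ids : List String) (out : Int × Int) : Decidable (Spec_get_multi_letter_counts box_ids out) := by unfold Spec_get_multi_letter_counts; infer_instance

-- ===== CLAIM (what is proved, stated in full; the proofs are below) =====
def Claim_equal_get_multi_letter_counts : Prop := ∀ (box_ids : List String), Dom_get_multi_letter_counts box_ids → Spec_get_multi_letter_counts box_ids (get_multi_letter_counts box_ids)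

-- ===== LEMMAS AND PROOFS =====

-- "some character occurs exactly k times in bid" (proof-side abbreviation)
def pvHasRep (bid : String) (k : Int) : Bool :=
  (PySem.Set.ofList bid.toList).any (fun c => ((PySem.List.count bid.toList c : Nat) : Int) == k)

-- lookup in the comprehension dict: value is the (constant per key) full-list count
theorem pvCharCounts_getD (full l : List Char) (d : PySem.Dict Char Int) (c : Char) :
    (l.foldl (fun d s => d.insert s ((PySem.List.count full s : Nat) : Int)) d).getD c 0
      = if c ∈ l then ((PySem.List.count full c : Nat) : Int) else d.getD c 0 := by
  induction l generalizing d with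
  | nil => simp
  | cons x xs ih =>
      simp only [List.foldl_cons, ih, PySem.Dict.getD_insert, List.mem_cons]
      by_cases hx : c = x <;> simp [hx]

theorem pvCharCounts_items (cs : List Char) :
    (pvCharCounts cs).items
      = (PySem.Set.ofList cs).map (fun c => (c, ((PySem.List.count cs c : Nat) : Int))) := by
  have hnd : (pvCharCounts cs).keys.Nodup :=
    PySem.Dict.nodup_keys_foldl_insert _ _ _ PySem.Dict.nodup_keys_empty
  have hkeys : (pvCharCounts cs).keys = PySem.Set.ofList cs := by
    unfold pvCharCounts
    rw [PySem.Dict.keys_foldl_insert]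
    simp [PySem.Set.update_nil_left]
  rw [PySem.Dict.items_eq_map_keys _ hnd 0, hkeys]
  refine List.map_congr_left (fun c hc => ?_)
  have hc' : c ∈ cs := (PySem.Set.mem_ofList cs c).1 hc
  unfold pvCharCounts
  rw [pvCharCounts_getD cs cs PySem.Dict.empty c]
  simp [hc']

-- the inner loop sets each flag iff some item has the matching count
theorem pvInner_eq (items : List (Char × Int)) (bid : String)
    (n2 n3 : PySem.Dict String Bool) :
    items.foldl
      (fun acc cn =>
        if cn.2 == 2 then (acc.1.insert bid true, acc.2)
        else if cn.2 == 3 then (acc.1, acc.2.insert bid true)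
        else acc) (n2, n3)
    = ((if items.any (fun cn => cn.2 == 2) then n2.insert bid true else n2),
       (if items.any (fun cn => cn.2 == 3) then n3.insert bid true else n3)) := by
  induction items generalizing n2 n3 with
  | nil => simp
  | cons x xs ih =>
      by_cases h2 : x.2 = 2
      · simp only [List.foldl_cons, List.any_cons, h2, ih]
        norm_num
        exact fun _ _ => PySem.Dict.insert_insert_self ..
      · by_cases h3 : x.2 = 3
        · simp only [List.foldl_cons, List.any_cons, h3, ih]
          simp [-List.any_eq_true, PySem.Dict.insert_insert_self]
        · simp only [List.foldl_cons, List.any_cons, ih]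
          simp [h2, h3, -List.any_eq_true]

theorem pvInner_closed (bid : String) (acc : PySem.Dict String Bool × PySem.Dict String Bool) :
    pvInner bid acc
    = ((if pvHasRep bid 2 then acc.1.insert bid true else acc.1),
       (if pvHasRep bid 3 then acc.2.insert bid true else acc.2)) := by
  obtain ⟨n2, n3⟩ := acc
  unfold pvInner
  rw [pvInner_eq, pvCharCounts_items]
  simp [pvHasRep, List.any_map, Function.comp]

-- a flag dict built over the filtered ids has as many entries as the set of those ids
theorem pvDict_size (p : String → Bool) (box_ids : List String) :
    (box_ids.foldl (fun d b => if p b then d.insert b true else d) PySem.Dict.empty).size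
      = (PySem.Set.ofList (box_ids.filter p)).length := by
  rw [PySem.List.foldl_if_eq_foldl_filter]
  have hkeys :
      ((box_ids.filter p).foldl (fun d b => d.insert b true) PySem.Dict.empty).keys
        = PySem.Set.ofList (box_ids.filter p) := by
    rw [PySem.Dict.keys_foldl_insert (f := fun _ _ => true)]
    simp [PySem.Set.update_nil_left]
  have := congrArg List.length hkeys
  simpa [PySem.Dict.keys, PySem.Dict.size] using this

-- ---- B side: correctness of the run scan on a sorted list ----

-- on a sorted list, the run scan detects exactly "some element occurs k times"
theorem pvRunScan_spec : ∀ (s : List Char), s.Pairwise (· ≤ ·) →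
    pvRunScan s = (decide (∃ c ∈ s, s.count c = 2), decide (∃ c ∈ s, s.count c = 3)) := by
  intro s
  induction s using pvRunScan.induct with
  | case1 => intro _; simp [pvRunScan]
  | case2 c rest ih =>
    intro hs
    have hrest : rest.Pairwise (· ≤ ·) := hs.of_cons
    have hcle : ∀ d ∈ rest, c ≤ d := fun d hd => List.rel_of_pairwise_cons hs hd
    have h1 : rest = rest.takeWhile (fun d => d == c) ++ rest.dropWhile (fun d => d == c) :=
      (List.takeWhile_append_dropWhile).symm
    have h2 : ∀ d ∈ rest.takeWhile (fun d => d == c), d = c := by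
      intro d hd
      simpa using List.mem_takeWhile_imp hd
    have hrs : (rest.dropWhile (fun d => d == c)).Pairwise (· ≤ ·) :=
      hrest.sublist (List.dropWhile_sublist _)
    have h3 : c ∉ rest.dropWhile (fun d => d == c) := by
      intro hcr
      have hne : rest.dropWhile (fun d => d == c) ≠ [] := List.ne_nil_of_mem hcr
      obtain ⟨x, r', hx⟩ := List.exists_cons_of_ne_nil hne
      have hhead : ((rest.dropWhile (fun d => d == c)).head hne == c) = false :=
        List.head_dropWhile_not (fun d => d == c) hne
      have hxh : (rest.dropWhile (fun d => d == c)).head hne = x := by simp [hx]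
      have hxc : x ≠ c := by rw [hxh] at hhead; simpa using hhead
      rw [hx] at hcr
      rcases List.mem_cons.1 hcr with heq | hcr'
      · exact hxc heq.symm
      · have hxle : x ≤ c := by
          have : (x :: r').Pairwise (· ≤ ·) := hx ▸ hrs
          exact List.rel_of_pairwise_cons this hcr'
        have hcx : c ≤ x := by
          refine hcle x ?_
          rw [h1, hx]; exact List.mem_append_right _ (List.mem_cons_self)
        exact hxc (le_antisymm hxle hcx)
    have hcount_t : (rest.takeWhile (fun d => d == c)).count c
        = (rest.takeWhile (fun d => d == c)).length := by
      refine List.count_eq_length.mpr ?_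
      intro b hb; exact (h2 b hb).symm
    have h4 : (c :: rest).count c = 1 + (rest.takeWhile (fun d => d == c)).length := by
      have hrc : rest.count c = (rest.takeWhile (fun d => d == c)).length := by
        conv_lhs => rw [h1]
        rw [List.count_append, hcount_t, List.count_eq_zero.mpr h3]
        omega
      rw [List.count_cons_self, hrc]
      omega
    have h5 : ∀ d, d ≠ c →
        (c :: rest).count d = (rest.dropWhile (fun d => d == c)).count d := by
      intro d hd
      have hrd : rest.count d = (rest.dropWhile (fun e => e == c)).count d := by
        conv_lhs => rw [h1]
        have : d ∉ rest.takeWhile (fun e => e == c) := fun h => hd (h2 d h)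
        rw [List.count_append, List.count_eq_zero.mpr this]
        omega
      rw [List.count_cons, hrd]
      have hcd : ¬ c = d := fun h => hd h.symm
      simp [hcd]
    have h6 : ∀ k : Nat, (∃ d ∈ (c :: rest), (c :: rest).count d = k) ↔
        ((1 + (rest.takeWhile (fun d => d == c)).length = k) ∨
         ∃ d ∈ rest.dropWhile (fun d => d == c),
           (rest.dropWhile (fun d => d == c)).count d = k) := by
      intro k
      constructor
      · rintro ⟨d, hd, hcnt⟩
        by_cases hdc : d = c
        · left; rw [hdc, h4] at hcnt; exact hcnt
        · right
          rcases List.mem_cons.1 hd with heq | hd'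
          · exact absurd heq hdc
          · rw [h1] at hd'
            rcases List.mem_append.1 hd' with h | h
            · exact absurd (h2 d h) hdc
            · exact ⟨d, h, by rw [← h5 d hdc]; exact hcnt⟩
      · rintro (hk | ⟨d, hd, hcnt⟩)
        · exact ⟨c, List.mem_cons_self, by rw [h4]; exact hk⟩
        · have hdc : d ≠ c := fun h => h3 (h ▸ hd)
          refine ⟨d, ?_, by rw [h5 d hdc]; exact hcnt⟩
          exact List.mem_cons_of_mem _ (h1 ▸ List.mem_append_right _ hd)
    rw [pvRunScan, ih hrs]
    have e2 := h6 2
    have e3 := h6 3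
    refine Prod.ext ?_ ?_ <;> simp only []
    · rw [show (decide (∃ d ∈ (c :: rest), (c :: rest).count d = 2))
            = decide ((1 + (rest.takeWhile (fun d => d == c)).length = 2) ∨
              ∃ d ∈ rest.dropWhile (fun d => d == c),
                (rest.dropWhile (fun d => d == c)).count d = 2) from decide_eq_decide.mpr e2]
      by_cases hrun : (1 + (rest.takeWhile (fun d => d == c)).length = 2) <;> simp [hrun]
    · rw [show (decide (∃ d ∈ (c :: rest), (c :: rest).count d = 3))
            = decide ((1 + (rest.takeWhile (fun d => d == c)).length = 3) ∨
              ∃ d ∈ rest.dropWhile (fun d => d == c),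
                (rest.dropWhile (fun d => d == c)).count d = 3) from decide_eq_decide.mpr e3]
      by_cases hrun : (1 + (rest.takeWhile (fun d => d == c)).length = 3) <;> simp [hrun]

-- transfer along the sorting permutation, stated on the flags A's loop uses
theorem pvRunScan_hasRep (bid : String) :
    pvRunScan (PySem.List.sorted bid.toList (fun c => c) false)
      = (pvHasRep bid 2, pvHasRep bid 3) := by
  have hp : (PySem.List.sorted bid.toList (fun c => c) false).Pairwise (· ≤ ·) := by
    simpa using PySem.List.sorted_pairwise bid.toList (fun c => c)
  have hperm : (PySem.List.sorted bid.toList (fun c => c) false).Perm bid.toList :=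
    PySem.List.sorted_perm bid.toList (fun c => c) false
  rw [pvRunScan_spec _ hp]
  have key : ∀ k : Nat, pvHasRep bid (k : Int)
      = decide (∃ c ∈ PySem.List.sorted bid.toList (fun c => c) false,
          (PySem.List.sorted bid.toList (fun c => c) false).count c = k) := by
    intro k
    apply Bool.eq_iff_iff.mpr
    simp only [pvHasRep, List.any_eq_true, PySem.Set.mem_ofList, PySem.List.count_eq,
      beq_iff_eq, decide_eq_true_eq, hperm.mem_iff]
    constructor
    · rintro ⟨x, hx, h⟩
      exact ⟨x, hx, by rw [hperm.count_eq]; exact_mod_cast h⟩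
    · rintro ⟨x, hx, h⟩
      rw [hperm.count_eq] at h
      exact ⟨x, hx, by exact_mod_cast h⟩
  refine Prod.ext ?_ ?_ <;> simp only []
  · have := key 2; simpa using this.symm
  · have := key 3; simpa using this.symm

-- B's fold in closed form
theorem pvFold_closed (l : List String) :
    l.foldl pvStep (0, 0, PySem.Set.empty)
      = (((PySem.Set.ofList (l.filter (fun b => pvHasRep b 2))).length : Int),
         ((PySem.Set.ofList (l.filter (fun b => pvHasRep b 3))).length : Int),
         PySem.Set.ofList l) := by
  induction l using List.reverseRecOn with
  | nil => rfl
  | append_singleton xs x ih =>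
    rw [List.foldl_append, List.foldl_cons, List.foldl_nil, ih]
    unfold pvStep
    simp only [pvRunScan_hasRep]
    by_cases hx : x ∈ PySem.Set.ofList xs
    · have hcont : PySem.Set.contains (PySem.Set.ofList xs) x = true := by
        simp [hx]
      simp only [hcont, if_true]
      have hxmem : x ∈ xs := (PySem.Set.mem_ofList xs x).1 hx
      have hfilters : ∀ p : String → Bool,
          PySem.Set.ofList ((xs ++ [x]).filter p) = PySem.Set.ofList (xs.filter p) := by
        intro p
        rw [List.filter_append]
        by_cases hpx : p x
        · simp only [List.filter_cons, hpx, if_true, List.filter_nil,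
            PySem.Set.ofList_append_singleton]
          exact PySem.Set.add_of_mem ((PySem.Set.mem_ofList _ _).2 (List.mem_filter.2 ⟨hxmem, hpx⟩))
        · simp [hpx]
      rw [hfilters, hfilters, PySem.Set.ofList_append_singleton, PySem.Set.add_of_mem hx]
    · have hcont : PySem.Set.contains (PySem.Set.ofList xs) x = false := by
        simpa using hx
      simp only [hcont, Bool.false_eq_true, if_false]
      have hxmem : x ∉ xs := fun h => hx ((PySem.Set.mem_ofList xs x).2 h)
      have hlen : ∀ p : String → Bool,
          ((PySem.Set.ofList ((xs ++ [x]).filter p)).length : Int)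
            = ((PySem.Set.ofList (xs.filter p)).length : Int) + (if p x then 1 else 0) := by
        intro p
        rw [List.filter_append]
        by_cases hpx : p x
        · have hnx : x ∉ PySem.Set.ofList (xs.filter p) := by
            intro h
            exact hxmem (List.mem_of_mem_filter ((PySem.Set.mem_ofList _ _).1 h))
          simp only [List.filter_cons, hpx, if_true, List.filter_nil,
            PySem.Set.ofList_append_singleton, PySem.Set.add_of_not_mem hnx,
            List.length_append, List.length_cons, List.length_nil]
          push_cast; ring
        · simp [hpx]
      rw [Prod.mk.injEq, Prod.mk.injEq]
      refine ⟨?_, ?_, ?_⟩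
      · simpa using (hlen (fun b => pvHasRep b 2)).symm
      · simpa using (hlen (fun b => pvHasRep b 3)).symm
      · rw [PySem.Set.ofList_append_singleton, PySem.Set.add_of_not_mem hx]

-- ===== VERDICT (by name: the statement is the Claim_ definition above) =====
theorem get_multi_letter_counts_spec : Claim_equal_get_multi_letter_counts := by
  intro box_ids _
  unfold Spec_get_multi_letter_counts get_multi_letter_counts get_multi_letter_counts_alt
  have hfold :
      box_ids.foldl (fun acc bid => pvInner bid acc) (PySem.Dict.empty, PySem.Dict.empty)
        = (box_ids.foldl (fun d b => if pvHasRep b 2 then d.insert b true else d) PySem.Dict.empty,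
           box_ids.foldl (fun d b => if pvHasRep b 3 then d.insert b true else d) PySem.Dict.empty) := by
    rw [← PySem.List.foldl_prod_mk
          (f := fun (d : PySem.Dict String Bool) b => if pvHasRep b 2 then d.insert b true else d)
          (g := fun (d : PySem.Dict String Bool) b => if pvHasRep b 3 then d.insert b true else d)]
    exact PySem.List.foldl_congr_mem
      (f := fun acc bid => pvInner bid acc)
      (g := fun (acc : PySem.Dict String Bool × PySem.Dict String Bool) b =>
        (if pvHasRep b 2 then acc.1.insert b true else acc.1,
         if pvHasRep b 3 then acc.2.insert b true else acc.2))
      (l := box_ids) (init := (PySem.Dict.empty, PySem.Dict.empty)) (fun acc x _ => pvInner_closed x acc)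
  simp only [hfold, pvDict_size, pvFold_closed]
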